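-- pv_equiv track=rewrite | github.com/yashwanth-lingareddy/dsa | techie-delight/90_k_sum_subarray.py | get_all_sub_arrays
-- ===== SOURCE A (Python) =====
-- from typing import List, Set, Tuple
--
-- def get_all_sub_arrays(nums: List[int], k: int) -> Set[Tuple[int]]:
--     result = set()
--     prefix_sum = 0
--     sum_dict = {0: [-1]}  # Initialize with 0: [-1] to handle the case when the subarray starts from index 0
--
--     for i in range(len(nums)):
--         prefix_sum += nums[i]
--         complement = prefix_sum - k
--         if complement in sum_dict:
--             for j in sum_dict[complement]:
--                 start_index = j + 1
--                 result.add(tuple(nums[start_index:i + 1]))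
--
--         if prefix_sum not in sum_dict:
--             sum_dict[prefix_sum] = []
--
--         sum_dict[prefix_sum].append(i)
--
--     return result
-- ===== SOURCE B (Python) =====
-- def get_all_sub_arrays(nums, k):
--     # Prefix-sum array + direct double scan over (end, start); no hash table of
--     # complement positions.
--     prefix = [0]
--     running = 0
--     for x in nums:
--         running += x
--         prefix.append(running)
--     result = set()
--     for end in range(len(nums)):
--         for start in range(end + 1):
--             if prefix[end + 1] - prefix[start] == k:
--                 result.add(tuple(nums[start:end + 1]))
--     return result
-- ===== Notes on version B (the rewrite author's own statement) =====
-- stated objective: simpler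
-- what changed: Replaces the hash table mapping each prefix sum to its list of positions (and complement lookups into it) with a plain prefix-sum array and two nested index loops that test each contiguous subarray's sum directly.
import Mathlib
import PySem

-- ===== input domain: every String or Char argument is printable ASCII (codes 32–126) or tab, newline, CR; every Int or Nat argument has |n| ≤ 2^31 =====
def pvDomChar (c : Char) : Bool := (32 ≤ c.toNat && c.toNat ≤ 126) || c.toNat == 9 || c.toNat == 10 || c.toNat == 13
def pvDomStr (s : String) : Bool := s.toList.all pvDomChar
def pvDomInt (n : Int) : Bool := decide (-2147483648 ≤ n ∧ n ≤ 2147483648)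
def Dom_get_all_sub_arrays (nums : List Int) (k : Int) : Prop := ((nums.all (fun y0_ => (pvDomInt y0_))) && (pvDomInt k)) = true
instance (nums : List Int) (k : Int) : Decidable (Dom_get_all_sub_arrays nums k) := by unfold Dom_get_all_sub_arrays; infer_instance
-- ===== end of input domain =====

-- B replaces A's prefix-sum→positions hash table with a prefix-sum array and a direct
-- nested scan over (end, start); return values (sets of tuples) are proved equal.

-- ===== PORT A =====
-- loop body of A's 'for i in range(len(nums))' (state: result set, prefix_sum, sum_dict)
def pvStepA (nums : List Int) (k : Int)
    (st : List (List Int) × Int × PySem.Dict Int (List Int)) (i : Int) :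
    List (List Int) × Int × PySem.Dict Int (List Int) :=
  -- i comes from range(len(nums)), so nums[i] never raises; default 0 is unreachable
  let prefix_sum := st.2.1 + PySem.List.pyGetD nums i 0
  let complement := prefix_sum - k
  let result :=
    if st.2.2.contains complement then
      (st.2.2.getD complement []).foldl
        (fun r j => PySem.Set.add r (PySem.List.slice nums (some (j + 1)) (some (i + 1)))) st.1
    else st.1
  let sum_dict := if st.2.2.contains prefix_sum then st.2.2 else st.2.2.insert prefix_sum []
  let sum_dict := sum_dict.modify prefix_sum [] (fun l => l ++ [i])
  (result, prefix_sum, sum_dict)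

def get_all_sub_arrays (nums : List Int) (k : Int) : List (List Int) :=
  ((PySem.List.pyRange 0 nums.length 1).foldl (pvStepA nums k)
    (PySem.Set.empty, 0, PySem.Dict.ofList [(0, [-1])])).1

-- ===== PORT B =====
-- inner 'for start in range(end + 1)' loop of B
def pvStepB (nums : List Int) (k : Int) (pfx : List Int)
    (res : List (List Int)) (e : Int) : List (List Int) :=
  (PySem.List.pyRange 0 (e + 1) 1).foldl
    (fun r s =>
      if PySem.List.pyGetD pfx (e + 1) 0 - PySem.List.pyGetD pfx s 0 = k then
        PySem.Set.add r (PySem.List.slice nums (some s) (some (e + 1)))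
      else r) res

def get_all_sub_arrays_alt (nums : List Int) (k : Int) : List (List Int) :=
  let pr := nums.foldl (fun (st : List Int × Int) x => (st.1 ++ [st.2 + x], st.2 + x)) ([0], 0)
  (PySem.List.pyRange 0 nums.length 1).foldl (pvStepB nums k pr.1) PySem.Set.empty

-- ===== PRECONDITION & SPEC =====
def Spec_get_all_sub_arrays (nums : List Int) (k : Int) (out : List (List Int)) : Prop := out = get_all_sub_arrays_alt nums k
instance (nums : List Int) (k : Int) (out : List (List Int)) : Decidable (Spec_get_all_sub_arrays nums k out) := by unfold Spec_get_all_sub_arrays; infer_instance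

-- ===== CLAIM (what is proved, stated in full; the proofs are below) =====
def Claim_equal_get_all_sub_arrays : Prop := ∀ (nums : List Int) (k : Int), Dom_get_all_sub_arrays nums k → Spec_get_all_sub_arrays nums k (get_all_sub_arrays nums k)

-- ===== LEMMAS AND PROOFS =====

-- prefix sum of the first s elements
def psum (nums : List Int) (s : Nat) : Int := (nums.take s).sum

-- the start positions 0..i whose prefix sum is c (A stores them shifted by -1)
def canonL (nums : List Int) (i : Nat) (c : Int) : List Nat :=
  (List.range (i + 1)).filter (fun s => decide (psum nums s = c))

-- the additions both programs perform at end index i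
def addsFor (nums : List Int) (k : Int) (i : Nat) (r : List (List Int)) : List (List Int) :=
  (canonL nums i (psum nums (i + 1) - k)).foldl
    (fun r (s : Nat) => PySem.Set.add r (PySem.List.slice nums (some (s : Int)) (some ((i : Int) + 1)))) r

def canonRes (nums : List Int) (k : Int) (m : Nat) : List (List Int) :=
  (List.range m).foldl (fun r i => addsFor nums k i r) []

-- invariant on A's sum_dict after processing i elements
def InvD (nums : List Int) (i : Nat) (D : PySem.Dict Int (List Int)) : Prop :=
  ∀ c, D.getD c [] = (canonL nums i c).map (fun (s : Nat) => (s : Int) - 1)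
     ∧ (D.contains c = true ↔ canonL nums i c ≠ [])

lemma psum_len (l : List Int) : psum l l.length = l.sum := by simp [psum]

lemma psum_succ (nums : List Int) (i : Nat) (h : i < nums.length) :
    psum nums (i + 1) = psum nums i + nums.getD i 0 := by
  have ht : nums.take (i + 1) = nums.take i ++ [nums[i]] := by
    rw [List.take_add_one, List.getElem?_eq_getElem h]
    rfl
  unfold psum
  rw [ht, List.sum_append, List.sum_cons, List.sum_nil,
    List.getD_eq_getElem?_getD, List.getElem?_eq_getElem h]
  simp

lemma psum_append_of_le (ys zs : List Int) (s : Nat) (h : s ≤ ys.length) :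
    psum (ys ++ zs) s = psum ys s := by
  simp [psum, List.take_append_of_le_length h]

lemma canonL_succ (nums : List Int) (i : Nat) (c : Int) :
    canonL nums (i + 1) c
      = canonL nums i c ++ (if psum nums (i + 1) = c then [i + 1] else []) := by
  simp only [canonL, List.range_succ, List.filter_append, List.filter_cons,
    List.filter_nil]
  split_ifs with h <;> simp_all

lemma foldl_pyRange_zero_cast {α : Type} (n : Nat) (f : α → Int → α) (init : α) :
    (PySem.List.pyRange 0 (n : Int) 1).foldl f init
      = (List.range n).foldl (fun a (i : Nat) => f a (i : Int)) init := by
  rw [PySem.List.pyRange_one]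
  simp [List.foldl_map]

lemma prefix_fold_aux (zs ys : List Int) :
    zs.foldl (fun (st : List Int × Int) x => (st.1 ++ [st.2 + x], st.2 + x))
      ((List.range (ys.length + 1)).map (fun s => psum ys s), psum ys ys.length)
    = ((List.range ((ys ++ zs).length + 1)).map (fun s => psum (ys ++ zs) s),
       psum (ys ++ zs) (ys ++ zs).length) := by
  induction zs generalizing ys with
  | nil => simp
  | cons x zs ih =>
    have hstate :
        ((List.range (ys.length + 1)).map (fun s => psum ys s) ++ [psum ys ys.length + x],
          psum ys ys.length + x)
        = ((List.range ((ys ++ [x]).length + 1)).map (fun s => psum (ys ++ [x]) s),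
           psum (ys ++ [x]) (ys ++ [x]).length) := by
      simp only [Prod.mk.injEq]
      refine ⟨?_, ?_⟩
      all_goals simp only [List.length_append, List.length_singleton]
      · conv_rhs => rw [List.range_succ, List.map_append]
        congr 1
        · exact List.map_congr_left (fun s hs =>
            (psum_append_of_le ys [x] s (Nat.lt_succ_iff.mp (List.mem_range.mp hs))).symm)
        · have hx : psum (ys ++ [x]) (ys.length + 1) = ys.sum + x := by
            simpa using psum_len (ys ++ [x])
          simp [psum_len, hx]
      · have hx : psum (ys ++ [x]) (ys.length + 1) = ys.sum + x := by
          simpa using psum_len (ys ++ [x])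
        simp [psum_len, hx]
    rw [List.foldl_cons, hstate, ih (ys ++ [x])]
    simp [List.append_assoc]

lemma prefix_fold (nums : List Int) :
    nums.foldl (fun (st : List Int × Int) x => (st.1 ++ [st.2 + x], st.2 + x)) ([0], 0)
      = ((List.range (nums.length + 1)).map (fun s => psum nums s),
         psum nums nums.length) := by
  have h := prefix_fold_aux nums []
  simpa [psum] using h

lemma stepB_eq (nums : List Int) (k : Int) (i : Nat) (h : i < nums.length)
    (res : List (List Int)) :
    pvStepB nums k ((List.range (nums.length + 1)).map (fun s => psum nums s)) res (i : Int)
      = addsFor nums k i res := by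
  have hgp : ∀ s : Nat, s < nums.length + 1 →
      PySem.List.pyGetD ((List.range (nums.length + 1)).map (fun s => psum nums s)) (s : Int) 0
        = psum nums s := by
    intro s hs
    rw [PySem.List.pyGetD_natCast]
    simp [List.getD, hs]
  unfold pvStepB
  rw [show ((i : Int) + 1) = ((i + 1 : Nat) : Int) from by push_cast; ring,
    foldl_pyRange_zero_cast]
  rw [PySem.List.foldl_congr_mem _ _
    (fun (r : List (List Int)) (s : Nat) => if psum nums s = psum nums (i + 1) - k
      then PySem.Set.add r (PySem.List.slice nums (some (s : Int)) (some ((i + 1 : Nat) : Int)))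
      else r) res ?_]
  · simp only [addsFor, canonL, List.foldl_filter, decide_eq_true_eq]
    rw [show (((i : Nat) + 1 : Nat) : Int) = ((i : Int) + 1) from by push_cast; ring]
  · intro acc s hs
    have hs' : s < i + 1 := List.mem_range.mp hs
    rw [hgp s (by omega), hgp (i + 1) (by omega)]
    have hiff : (psum nums (i + 1) - psum nums s = k) ↔ (psum nums s = psum nums (i + 1) - k) := by
      omega
    simp only [hiff]

lemma stepA_eq (nums : List Int) (k : Int) (i : Nat) (h : i < nums.length)
    (res : List (List Int)) (D : PySem.Dict Int (List Int)) (hD : InvD nums i D) :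
    ∃ D', pvStepA nums k (res, psum nums i, D) (i : Int)
        = (addsFor nums k i res, psum nums (i + 1), D') ∧ InvD nums (i + 1) D' := by
  have hps : psum nums i + PySem.List.pyGetD nums (i : Int) 0 = psum nums (i + 1) := by
    rw [PySem.List.pyGetD_natCast, psum_succ nums i h]
  set p := psum nums (i + 1) with hp
  have hresult : (if D.contains (p - k) then
      (D.getD (p - k) []).foldl
        (fun r j => PySem.Set.add r (PySem.List.slice nums (some (j + 1)) (some ((i : Int) + 1)))) res
    else res) = addsFor nums k i res := by
    cases hcon : D.contains (p - k) with
    | true =>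
      simp only [if_true]
      rw [(hD (p - k)).1, List.foldl_map]
      simp only [sub_add_cancel]
      rfl
    | false =>
      have hnil : canonL nums i (p - k) = [] := by
        by_contra hne
        simp [(hD (p - k)).2.mpr hne] at hcon
      simp only [Bool.false_eq_true, if_false]
      unfold addsFor
      rw [← hp, hnil]
      rfl
  have hD1get : ∀ c, (if D.contains p then D else D.insert p []).getD c [] = D.getD c [] := by
    intro c
    cases hcp : D.contains p with
    | true => simp
    | false =>
      simp only [Bool.false_eq_true, if_false]
      rw [PySem.Dict.getD_insert]
      split_ifs with hcpeq
      · subst hcpeq; rw [PySem.Dict.getD_of_not_contains D [] hcp]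
      · rfl
  have hD1con : ∀ c, ((if D.contains p then D else D.insert p []).contains c = true)
      ↔ (c = p ∨ D.contains c = true) := by
    intro c
    cases hcp : D.contains p with
    | true =>
      simp only [if_true]
      constructor
      · exact fun hc => Or.inr hc
      · rintro (rfl | hc)
        · exact hcp
        · exact hc
    | false =>
      simp only [Bool.false_eq_true, if_false, PySem.Dict.contains_insert]
      simp [beq_iff_eq]
  refine ⟨(if D.contains p then D else D.insert p []).modify p [] (fun l => l ++ [(i : Int)]),
    ?_, ?_⟩
  · show pvStepA nums k (res, psum nums i, D) (i : Int) = _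
    simp only [pvStepA]
    rw [hps, hresult]
  · intro c
    have hcan := canonL_succ nums i c
    constructor
    · rw [PySem.Dict.getD_modify, hD1get, hD1get]
      split_ifs with hcp
      · rw [hcp, (hD p).1, canonL_succ, if_pos hp.symm, List.map_append]
        simp
      · rw [(hD c).1, canonL_succ, if_neg (fun hh => hcp (hh.symm.trans hp.symm))]
        simp
    · rw [PySem.Dict.contains_modify]
      have hne : canonL nums (i + 1) c ≠ [] ↔ (canonL nums i c ≠ [] ∨ p = c) := by
        rw [hcan, hp]
        split_ifs with hpc
        · constructor
          · intro _; exact Or.inr hpc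
          · intro _; simp
        · simp [hpc]
      rw [hne]
      simp only [Bool.or_eq_true, beq_iff_eq, hD1con, (hD c).2]
      constructor
      · rintro (rfl | rfl | hc)
        · right; rfl
        · right; rfl
        · left; exact hc
      · rintro (hc | rfl)
        · right; right; exact hc
        · left; rfl

lemma invD_zero (nums : List Int) : InvD nums 0 (PySem.Dict.ofList [(0, [-1])]) := by
  have hof : (PySem.Dict.ofList [((0 : Int), [(-1 : Int)])])
      = PySem.Dict.empty.insert 0 [-1] := rfl
  intro c
  have hcan : canonL nums 0 c = if c = 0 then [0] else [] := by
    have h0 : psum nums 0 = 0 := by simp [psum]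
    simp only [canonL]
    split_ifs <;> simp_all [eq_comm]
  constructor
  · rw [hof, PySem.Dict.getD_insert, hcan]
    split_ifs <;> simp
  · rw [hof, PySem.Dict.contains_insert, hcan]
    split_ifs with hc <;> simp [hc]

lemma A_loop (nums : List Int) (k : Int) (m : Nat) (hm : m ≤ nums.length) :
    ∃ D, (List.range m).foldl (fun st (i : Nat) => pvStepA nums k st (i : Int))
        ([], 0, PySem.Dict.ofList [(0, [-1])])
      = (canonRes nums k m, psum nums m, D) ∧ InvD nums m D := by
  induction m with
  | zero =>
    refine ⟨PySem.Dict.ofList [(0, [-1])], ?_, invD_zero nums⟩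
    simp [canonRes, psum]
  | succ m ih =>
    obtain ⟨D, hfold, hinv⟩ := ih (by omega)
    obtain ⟨D', hstep, hinv'⟩ := stepA_eq nums k m (by omega) (canonRes nums k m) D hinv
    refine ⟨D', ?_, hinv'⟩
    rw [List.range_succ, List.foldl_append, hfold]
    simp only [List.foldl_cons, List.foldl_nil, hstep]
    congr 1
    simp [canonRes, List.range_succ, addsFor]

-- ===== VERDICT (by name: the statement is the Claim_ definition above) =====
theorem get_all_sub_arrays_spec : Claim_equal_get_all_sub_arrays := by
  intro nums k _
  show get_all_sub_arrays nums k = get_all_sub_arrays_alt nums k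
  unfold get_all_sub_arrays get_all_sub_arrays_alt
  rw [prefix_fold]
  rw [foldl_pyRange_zero_cast, foldl_pyRange_zero_cast]
  obtain ⟨D, hA, _⟩ := A_loop nums k nums.length le_rfl
  have hB : (List.range nums.length).foldl
      (fun r (i : Nat) => pvStepB nums k ((List.range (nums.length + 1)).map (fun s => psum nums s)) r (i : Int))
      PySem.Set.empty
      = canonRes nums k nums.length := by
    rw [PySem.List.foldl_congr_mem _ _ (fun r i => addsFor nums k i r) PySem.Set.empty
      (fun acc i hi => stepB_eq nums k i (List.mem_range.mp hi) acc)]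
    rfl
  rw [hB]
  rw [show (PySem.Set.empty : List (List Int)) = [] from rfl]
  rw [hA]
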